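-- pv_equiv track=rewrite | github.com/firas357952/france-ioi | Niveau_3/Tableaux avancés/Carré_magique.py | C1
-- ===== SOURCE A (Python) =====
-- def C1(N, Matrix):
--     List = [True] * (N * N)
--     for Lig in range(N):
--         for Col in range(N):
--             number = Matrix[Lig][Col]
--             if number > N**2 or number <= 0:
--                 return False
--             elif List[number - 1]:
--                 List[number - 1] = False
--             else:
--                 return False
--     return True
-- ===== SOURCE B (Python) =====
-- def C1(N, Matrix):
--     flat = [Matrix[i][j] for i in range(N) for j in range(N)]
--     return sorted(flat) == list(range(1, len(flat) + 1))
-- ===== Notes on version B (the rewrite author's own statement) =====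
-- stated objective: simpler
-- what changed: Replaces the stateful boolean-marker array with per-element range checks and early returns by a flatten, sort, and single comparison against range(1, len(flat)+1) (a permutation test; len(flat) = N*N for the square matrices Pre_ admits).
-- outside the precondition, e.g. on C1(2, [[0], [1, 2]]): A returns False, B raises IndexError
import Mathlib
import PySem

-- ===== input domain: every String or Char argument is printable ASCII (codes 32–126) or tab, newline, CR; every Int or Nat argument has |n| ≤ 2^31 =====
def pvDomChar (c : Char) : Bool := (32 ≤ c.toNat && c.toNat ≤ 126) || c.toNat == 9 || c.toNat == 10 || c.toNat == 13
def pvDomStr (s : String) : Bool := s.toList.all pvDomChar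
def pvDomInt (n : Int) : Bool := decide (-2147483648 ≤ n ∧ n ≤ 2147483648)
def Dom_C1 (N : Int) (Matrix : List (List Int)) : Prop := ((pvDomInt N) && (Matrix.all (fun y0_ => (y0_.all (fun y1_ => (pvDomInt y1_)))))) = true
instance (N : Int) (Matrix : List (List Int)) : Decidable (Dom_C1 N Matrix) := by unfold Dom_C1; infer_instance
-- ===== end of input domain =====

-- B replaces A's stateful boolean-marker array and early returns by flatten → sort → compare
-- with range(1, len(flat)+1) (= 1..N*N on the square matrices Pre_C1 admits); a permutation
-- test (objective: simpler, not faster).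

-- ===== PORT A =====
-- inner 'for Col in range(N)' loop; the early 'return False' is the 'none' outcome.
-- pyGetD with a default is exact here: Pre_C1 keeps every index in range.
def C1cols (N : Int) (row : List Int) (cols : List Int) (lst : List Bool) : Option (List Bool) :=
  match cols with
  | [] => some lst
  | c :: rest =>
    let number := PySem.List.pyGetD row c 0
    if number > N ^ 2 || number ≤ 0 then none
    else if PySem.List.pyGetD lst (number - 1) false then
      C1cols N row rest (PySem.List.pySetD lst (number - 1) false)
    else none

-- outer 'for Lig in range(N)' loop
def C1rows (N : Int) (Matrix : List (List Int)) (rows : List Int) (lst : List Bool) : Bool :=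
  match rows with
  | [] => true
  | r :: rest =>
    match C1cols N (PySem.List.pyGetD Matrix r []) (PySem.List.pyRange 0 N 1) lst with
    | none => false
    | some lst' => C1rows N Matrix rest lst'

def C1 (N : Int) (Matrix : List (List Int)) : Bool :=
  C1rows N Matrix (PySem.List.pyRange 0 N 1) (List.replicate (N * N).toNat true)

-- ===== PORT B =====
def C1_alt (N : Int) (Matrix : List (List Int)) : Bool :=
  let flat := (PySem.List.pyRange 0 N 1).flatMap (fun i =>
    (PySem.List.pyRange 0 N 1).map (fun j =>
      PySem.List.pyGetD (PySem.List.pyGetD Matrix i []) j 0))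
  PySem.List.sorted flat (fun x => x) false ==
    PySem.List.pyRange 1 ((flat.length : Int) + 1) 1

-- ===== PRECONDITION & SPEC =====
-- Pre_ excludes ragged/short matrices with fewer than N rows or fewer than N usable cells per
-- row: A may still return an early False there, but B's full flatten raises IndexError there
-- (the Lean ports happen to agree even on such inputs, so the equality proof below does not
-- need Pre_; it is stated because Python B raises rather than returns outside it).
def Pre_C1 (N : Int) (Matrix : List (List Int)) : Prop :=
  0 < N → N ≤ (Matrix.length : Int) ∧
    ∀ row ∈ Matrix.take N.toNat, N ≤ (row.length : Int)
instance (N : Int) (Matrix : List (List Int)) : Decidable (Pre_C1 N Matrix) := by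
  unfold Pre_C1; infer_instance

def pvWitness_C1 : Int × List (List Int) := (2, [[1, 2], [4, 3]])

def Spec_C1 (N : Int) (Matrix : List (List Int)) (out : Bool) : Prop := out = C1_alt N Matrix
instance (N : Int) (Matrix : List (List Int)) (out : Bool) : Decidable (Spec_C1 N Matrix out) := by unfold Spec_C1; infer_instance

-- ===== CLAIM (what is proved, stated in full; the proofs are below) =====
def Claim_equal_C1 : Prop := ∀ (N : Int) (Matrix : List (List Int)), Dom_C1 N Matrix → Pre_C1 N Matrix → Spec_C1 N Matrix (C1 N Matrix)

-- ===== LEMMAS AND PROOFS =====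

-- single scan over the flattened value sequence, same state as A's inner loop
def pvScan (N : Int) (vs : List Int) (lst : List Bool) : Option (List Bool) :=
  match vs with
  | [] => some lst
  | v :: rest =>
    if v > N ^ 2 || v ≤ 0 then none
    else if PySem.List.pyGetD lst (v - 1) false then
      pvScan N rest (PySem.List.pySetD lst (v - 1) false)
    else none

theorem C1cols_eq_scan (N : Int) (row : List Int) (cols : List Int) (lst : List Bool) :
    C1cols N row cols lst = pvScan N (cols.map (fun c => PySem.List.pyGetD row c 0)) lst := by
  induction cols generalizing lst with
  | nil => rfl
  | cons c rest ih =>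
    simp only [C1cols, pvScan, List.map]
    split_ifs <;> simp [ih]

theorem pvScan_append (N : Int) (a b : List Int) (lst : List Bool) :
    pvScan N (a ++ b) lst = (pvScan N a lst).bind (pvScan N b) := by
  induction a generalizing lst with
  | nil => rfl
  | cons v rest ih =>
    simp only [List.cons_append, pvScan]
    split_ifs <;> simp [ih]

theorem C1rows_eq_scan (N : Int) (Matrix : List (List Int)) (rows : List Int) (lst : List Bool) :
    C1rows N Matrix rows lst =
      (pvScan N (rows.flatMap (fun r =>
        (PySem.List.pyRange 0 N 1).map
          (fun c => PySem.List.pyGetD (PySem.List.pyGetD Matrix r []) c 0))) lst).isSome := by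
  induction rows generalizing lst with
  | nil => rfl
  | cons r rest ih =>
    simp only [C1rows, List.flatMap_cons, pvScan_append, C1cols_eq_scan]
    cases pvScan N ((PySem.List.pyRange 0 N 1).map
        (fun c => PySem.List.pyGetD (PySem.List.pyGetD Matrix r []) c 0)) lst with
    | none => rfl
    | some lst' => simpa using ih lst'

theorem pvScan_isSome_iff (N : Int) (vs : List Int) (lst : List Bool)
    (hlen : N ^ 2 ≤ (lst.length : Int)) :
    (pvScan N vs lst).isSome = true ↔
      (∀ v ∈ vs, 0 < v ∧ v ≤ N ^ 2) ∧ vs.Nodup ∧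
        (∀ v ∈ vs, PySem.List.pyGetD lst (v - 1) false = true) := by
  induction vs generalizing lst with
  | nil => simp [pvScan]
  | cons v rest ih =>
    simp only [pvScan]
    split_ifs with h1 h2
    · simp only [Option.isSome_none, Bool.false_eq_true, false_iff]
      intro ⟨hr, _, _⟩
      have := hr v (by simp)
      simp only [gt_iff_lt, Bool.or_eq_true, decide_eq_true_eq] at h1
      omega
    · have hvpos : 0 < v ∧ v ≤ N ^ 2 := by
        simp only [gt_iff_lt, Bool.or_eq_true, decide_eq_true_eq] at h1; omega
      have hvlen : (v - 1).toNat < lst.length := by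
        have hx : v - 1 < (lst.length : Int) := by omega
        omega
      have hlen' : N ^ 2 ≤ ((PySem.List.pySetD lst (v - 1) false).length : Int) := by
        rw [PySem.List.pySetD_of_nonneg lst false (by omega), List.length_set]; exact hlen
      rw [ih _ hlen']
      have hget : ∀ w : Int, 0 < w →
          PySem.List.pyGetD (PySem.List.pySetD lst (v - 1) false) (w - 1) false =
            (if w = v then false else PySem.List.pyGetD lst (w - 1) false) := by
        intro w hw
        have hcv : ((v - 1).toNat : Int) = v - 1 := Int.toNat_of_nonneg (by omega)
        have hcw : ((w - 1).toNat : Int) = w - 1 := Int.toNat_of_nonneg (by omega)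
        rw [← hcv, ← hcw,
            PySem.List.pyGetD_pySetD_natCast lst _ _ false false hvlen]
        by_cases hwv : w = v
        · rw [if_pos (by omega), if_pos hwv]
        · rw [if_neg (by omega), if_neg hwv]
      constructor
      · rintro ⟨hr, hnd, hmark⟩
        have hvnotin : v ∉ rest := by
          intro hv
          have := hmark v hv
          rw [hget v hvpos.1, if_pos rfl] at this
          cases this
        refine ⟨?_, List.nodup_cons.mpr ⟨hvnotin, hnd⟩, ?_⟩
        · intro w hw
          rcases List.mem_cons.1 hw with rfl | hw
          · exact hvpos
          · exact hr w hw
        · intro w hw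
          rcases List.mem_cons.1 hw with rfl | hw
          · exact h2
          · have := hmark w hw
            rw [hget w (hr w hw).1, if_neg (fun h : w = v => hvnotin (h ▸ hw))] at this
            exact this
      · rintro ⟨hr, hnd, hmark⟩
        have hvnotin : v ∉ rest := (List.nodup_cons.1 hnd).1
        refine ⟨?_, (List.nodup_cons.1 hnd).2, ?_⟩
        · intro w hw; exact hr w (List.mem_cons_of_mem _ hw)
        · intro w hw
          rw [hget w (hr w (List.mem_cons_of_mem _ hw)).1,
              if_neg (fun h : w = v => hvnotin (h ▸ hw))]
          exact hmark w (List.mem_cons_of_mem _ hw)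
    · simp only [Option.isSome_none, Bool.false_eq_true, false_iff]
      intro ⟨_, _, hmark⟩
      exact h2 (hmark v (by simp))

theorem pvFlat_length (N : Int) (Matrix : List (List Int)) (h : 0 ≤ N) :
    ((PySem.List.pyRange 0 N 1).flatMap (fun i =>
      (PySem.List.pyRange 0 N 1).map (fun j =>
        PySem.List.pyGetD (PySem.List.pyGetD Matrix i []) j 0))).length = (N * N).toNat := by
  obtain ⟨n, rfl⟩ := Int.eq_ofNat_of_zero_le h
  rw [List.length_flatMap]
  have hmc : ((PySem.List.pyRange 0 (n : Int) 1).map (fun i =>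
      ((PySem.List.pyRange 0 (n : Int) 1).map (fun j =>
        PySem.List.pyGetD (PySem.List.pyGetD Matrix i []) j 0)).length)) =
      (PySem.List.pyRange 0 (n : Int) 1).map (fun _ => n) := by
    apply List.map_congr_left; intro i _
    simp [PySem.List.length_pyRange_one]
  rw [hmc, List.map_const', List.sum_replicate, PySem.List.length_pyRange_one]
  have h2 : ((n : Int) - 0).toNat = n := by omega
  have h3 : ((n : Int) * (n : Int)).toNat = n * n := by
    rw [← Nat.cast_mul, Int.toNat_natCast]
  rw [h2, h3, smul_eq_mul]

-- B's sorted comparison is a permutation test: it succeeds exactly on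
-- range-bounded duplicate-free value sequences of the right length.
theorem pvSorted_eq_range_iff (N : Int) (vs : List Int) (hN : 0 ≤ N)
    (hlen : vs.length = (N * N).toNat) :
    PySem.List.sorted vs (fun x => x) false = PySem.List.pyRange 1 (N * N + 1) 1 ↔
      (∀ v ∈ vs, 0 < v ∧ v ≤ N ^ 2) ∧ vs.Nodup := by
  have hsq : N ^ 2 = N * N := pow_two N
  have hNN : (0 : Int) ≤ N * N := mul_nonneg hN hN
  have hmemR : ∀ v : Int, v ∈ PySem.List.pyRange 1 (N * N + 1) 1 ↔ 0 < v ∧ v ≤ N ^ 2 := by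
    intro v; rw [PySem.List.mem_pyRange_one]; omega
  have hlenR : (PySem.List.pyRange 1 (N * N + 1) 1).length = (N * N).toNat := by
    rw [PySem.List.length_pyRange_one]; omega
  constructor
  · intro hsorted
    have hperm : vs.Perm (PySem.List.pyRange 1 (N * N + 1) 1) :=
      (PySem.List.sorted_perm vs (fun x => x) false).symm.trans
        (hsorted ▸ List.Perm.refl _)
    exact ⟨fun v hv => (hmemR v).mp (hperm.mem_iff.mp hv),
      hperm.nodup_iff.mpr (PySem.List.nodup_pyRange_one 1 (N * N + 1))⟩
  · rintro ⟨hr, hnd⟩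
    have hsub : vs ⊆ PySem.List.pyRange 1 (N * N + 1) 1 :=
      fun v hv => (hmemR v).mpr (hr v hv)
    have hperm : (PySem.List.pyRange 1 (N * N + 1) 1).Perm vs :=
      ((List.subperm_of_subset hnd hsub).perm_of_length_le (by omega)).symm
    exact PySem.List.sorted_eq_of_perm_of_pairwise_lt vs
      (PySem.List.pyRange 1 (N * N + 1) 1) (fun x => x) hperm
      (PySem.List.pairwise_lt_pyRange_one 1 (N * N + 1))

-- ===== VERDICT (by name: the statement is the Claim_ definition above) =====
theorem C1_spec : Claim_equal_C1 := by
  intro N Matrix _ _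
  unfold Spec_C1
  rcases (by omega : N ≤ 0 ∨ 0 < N) with hN0 | hN0
  · have h0 : PySem.List.pyRange 0 N 1 = [] := PySem.List.pyRange_one_eq_nil hN0
    unfold C1 C1_alt
    rw [h0]
    simp [C1rows, PySem.List.pyRange_one_eq_nil (by omega : (1:Int) ≤ 1), PySem.List.sorted_eq_nil_iff]
  · have hN : (0 : Int) ≤ N := le_of_lt hN0
    have hNN : (0 : Int) ≤ N * N := mul_nonneg hN hN
    have hflatlen := pvFlat_length N Matrix hN
    have hA : C1 N Matrix = (pvScan N
        ((PySem.List.pyRange 0 N 1).flatMap (fun i =>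
          (PySem.List.pyRange 0 N 1).map (fun j =>
            PySem.List.pyGetD (PySem.List.pyGetD Matrix i []) j 0)))
        (List.replicate (N * N).toNat true)).isSome :=
      C1rows_eq_scan N Matrix (PySem.List.pyRange 0 N 1) (List.replicate (N * N).toNat true)
    have hB : C1_alt N Matrix = (PySem.List.sorted
        ((PySem.List.pyRange 0 N 1).flatMap (fun i =>
          (PySem.List.pyRange 0 N 1).map (fun j =>
            PySem.List.pyGetD (PySem.List.pyGetD Matrix i []) j 0)))
        (fun x => x) false == PySem.List.pyRange 1
          ((((PySem.List.pyRange 0 N 1).flatMap (fun i =>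
            (PySem.List.pyRange 0 N 1).map (fun j =>
              PySem.List.pyGetD (PySem.List.pyGetD Matrix i []) j 0))).length : Int) + 1) 1) :=
      rfl
    have hcast : ((((PySem.List.pyRange 0 N 1).flatMap (fun i =>
        (PySem.List.pyRange 0 N 1).map (fun j =>
          PySem.List.pyGetD (PySem.List.pyGetD Matrix i []) j 0))).length : Int) + 1) =
        N * N + 1 := by
      rw [hflatlen, Int.toNat_of_nonneg hNN]
    rw [hA, hB, hcast, Bool.eq_iff_iff, beq_iff_eq]
    rw [pvScan_isSome_iff N _ _
      (by rw [List.length_replicate, Int.toNat_of_nonneg hNN]; nlinarith)]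
    rw [pvSorted_eq_range_iff N _ hN hflatlen]
    have hmark : ∀ v : Int, 0 < v → v ≤ N ^ 2 →
        PySem.List.pyGetD (List.replicate (N * N).toNat true) (v - 1) false = true := by
      intro v h1 h2
      have hsq : N ^ 2 = N * N := pow_two N
      rw [PySem.List.pyGetD_of_nonneg _ false (by omega : (0:Int) ≤ v - 1)]
      exact List.getD_replicate true (by omega : (v - 1).toNat < (N * N).toNat)
    constructor
    · rintro ⟨hr, hnd, -⟩; exact ⟨hr, hnd⟩
    · rintro ⟨hr, hnd⟩
      exact ⟨hr, hnd, fun v hv => hmark v (hr v hv).1 (hr v hv).2⟩
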